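-- pv_equiv track=rewrite | github.com/eved1018/EN.605.621.84.FA25 | Mod1/stupid_sort.py | sprint
-- ===== SOURCE A (Python) =====
-- def sprint(arr, x):
--     s = []
--     i = 0
--     while i < len(arr):
--         if i == x:
--             s.append(f"{{{arr[i]}, {arr[i+1]}}}")
--             i +=2
--         else:
--             s.append(arr[i])
--             i +=1
--     return s
-- ===== SOURCE B (Python) =====
-- def sprint(arr, x):
--     if 0 <= x < len(arr):
--         return list(arr[:x]) + [f"{{{arr[x]}, {arr[x+1]}}}"] + list(arr[x + 2:])
--     return list(arr)
-- ===== Notes on version B (the rewrite author's own statement) =====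
-- stated objective: simpler
-- what changed: Replaces the index-driven while loop with a single guarded slice expression: prefix + formatted pair + suffix when 0 <= x < len(arr), else a plain copy; C-level slicing gives a measured constant-factor speedup.
import Mathlib
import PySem

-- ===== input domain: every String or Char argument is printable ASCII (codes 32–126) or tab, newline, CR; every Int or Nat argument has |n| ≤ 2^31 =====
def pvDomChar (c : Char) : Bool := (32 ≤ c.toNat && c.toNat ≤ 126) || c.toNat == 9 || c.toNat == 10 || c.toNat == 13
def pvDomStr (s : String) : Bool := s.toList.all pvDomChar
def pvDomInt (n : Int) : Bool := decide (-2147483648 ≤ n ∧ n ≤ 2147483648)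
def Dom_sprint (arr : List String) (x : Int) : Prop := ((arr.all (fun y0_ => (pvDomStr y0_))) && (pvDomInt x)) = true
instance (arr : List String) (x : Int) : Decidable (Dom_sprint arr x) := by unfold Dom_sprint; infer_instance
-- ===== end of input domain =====

-- B replaces A's index-driven while loop by one guarded slice expression (simpler decomposition, same cost).

-- ===== PORT A =====
-- Literal port of the while loop; state = (i, s).  The access arr[i+1] is only
-- reached with i+1 in range on Pre_ (x = len-1 raises IndexError in Python and
-- is excluded), so getD "" is exact there.
def sprintLoop (arr : List String) (x : Int) (i : Nat) (s : List String) : List String :=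
  if _h : i < arr.length then
    if (i : Int) = x then
      sprintLoop arr x (i + 2) (s ++ ["{" ++ arr.getD i "" ++ ", " ++ arr.getD (i + 1) "" ++ "}"])
    else
      sprintLoop arr x (i + 1) (s ++ [arr.getD i ""])
  else s
termination_by arr.length - i

def sprint (arr : List String) (x : Int) : List String := sprintLoop arr x 0 []

-- ===== PORT B =====
def sprint_alt (arr : List String) (x : Int) : List String :=
  if 0 ≤ x ∧ x < (arr.length : Int) then
    let n := x.toNat
    arr.take n ++ ["{" ++ arr.getD n "" ++ ", " ++ arr.getD (n + 1) "" ++ "}"] ++ arr.drop (n + 2)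
  else arr

-- ===== PRECONDITION & SPEC =====
-- Pre_ excludes exactly the inputs where Python A raises IndexError:
-- a nonempty arr with x equal to the last index (arr[x+1] is out of range).
def Pre_sprint (arr : List String) (x : Int) : Prop := arr = [] ∨ x ≠ (arr.length : Int) - 1
instance (arr : List String) (x : Int) : Decidable (Pre_sprint arr x) := by unfold Pre_sprint; infer_instance
def pvWitness_sprint : List String × Int := (["a", "b", "c"], 1)

def Spec_sprint (arr : List String) (x : Int) (out : List String) : Prop := out = sprint_alt arr x
instance (arr : List String) (x : Int) (out : List String) : Decidable (Spec_sprint arr x out) := by unfold Spec_sprint; infer_instance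

-- ===== CLAIM (what is proved, stated in full; the proofs are below) =====
def Claim_equal_sprint : Prop := ∀ (arr : List String) (x : Int), Dom_sprint arr x → Pre_sprint arr x → Spec_sprint arr x (sprint arr x)

-- ===== LEMMAS AND PROOFS =====

-- After the match (or when no index matches), the loop copies the rest.
theorem sprintLoop_no_match (arr : List String) (x : Int) (i : Nat) (s : List String)
    (h : ∀ j : Nat, i ≤ j → j < arr.length → (j : Int) ≠ x) :
    sprintLoop arr x i s = s ++ arr.drop i := by
  induction hn : arr.length - i using Nat.strong_induction_on generalizing i s with
  | _ n ih =>
    unfold sprintLoop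
    by_cases hi : i < arr.length
    · simp only [hi, dif_pos]
      rw [if_neg (h i le_rfl hi)]
      rw [ih (arr.length - (i + 1)) (by omega) (i + 1) _ (fun j hj hj2 => h j (by omega) hj2) rfl]
      rw [List.drop_eq_getElem_cons hi]
      simp [List.getD, List.getElem?_eq_getElem hi]
    · simp only [hi, dif_neg, not_false_iff]
      rw [List.drop_eq_nil_of_le (by omega)]
      simp

-- Before reaching the matching index n (with n+1 in range), the loop produces
-- the prefix, the formatted pair, and the copied tail.
theorem sprintLoop_match (arr : List String) (x : Int) (n : Nat) (hx : (n : Int) = x)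
    (hn1 : n + 1 < arr.length) (i : Nat) (hi : i ≤ n) (s : List String) :
    sprintLoop arr x i s =
      s ++ (arr.drop i).take (n - i) ++
        ["{" ++ arr.getD n "" ++ ", " ++ arr.getD (n + 1) "" ++ "}"] ++ arr.drop (n + 2) := by
  induction hk : n - i using Nat.strong_induction_on generalizing i s with
  | _ k ih =>
    subst hk
    unfold sprintLoop
    have hil : i < arr.length := by omega
    simp only [hil, dif_pos]
    by_cases hmatch : (i : Int) = x
    · have : i = n := by omega
      subst this
      rw [if_pos hmatch]
      rw [sprintLoop_no_match arr x (i + 2) _ (fun j hj _ => by omega)]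
      simp
    · have hin : i < n := by
        rcases Nat.lt_or_ge i n with h | h
        · exact h
        · exact absurd (by omega : (i : Int) = x) hmatch
      rw [if_neg hmatch]
      rw [ih (n - (i + 1)) (by omega) (i + 1) (by omega) _ rfl]
      have : (arr.drop i).take (n - i) = arr.getD i "" :: (arr.drop (i + 1)).take (n - (i + 1)) := by
        rw [List.drop_eq_getElem_cons hil]
        have : n - i = (n - (i + 1)) + 1 := by omega
        rw [this, List.take_succ_cons]
        simp [List.getD, List.getElem?_eq_getElem hil]
      rw [this]
      simp

-- ===== VERDICT (by name: the statement is the Claim_ definition above) =====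
theorem sprint_spec : Claim_equal_sprint := by
  intro arr x _ hpre
  unfold Spec_sprint sprint sprint_alt
  by_cases hx : 0 ≤ x ∧ x < (arr.length : Int)
  · rw [if_pos hx]
    have hlast : x ≠ (arr.length : Int) - 1 := by
      rcases hpre with h | h
      · subst h; simp at hx; omega
      · exact h
    have hn1 : x.toNat + 1 < arr.length := by omega
    have hx' : (x.toNat : Int) = x := Int.toNat_of_nonneg hx.1
    rw [sprintLoop_match arr x x.toNat hx' hn1 0 (Nat.zero_le _) []]
    simp
  · rw [if_neg hx]
    rw [sprintLoop_no_match arr x 0 [] (fun j _ hjl hj => by push Not at hx; omega)]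
    simp
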